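-- pv_equiv track=rewrite | github.com/Alek2ander/aoc-2022 | 2022/06.py | find_non_repeating
-- ===== SOURCE A (Python) =====
-- from collections import Counter
--
-- def find_non_repeating(s, n):
--     counter = Counter(s[:n])
--     for i, l in enumerate(s[n:]):
--         if len(counter) == n:
--             return i + n
--         else:
--             if l not in counter:
--                 counter[l] = 0
--             counter[l] += 1
--             if counter[s[i]] == 1:
--                 del counter[s[i]]
--             else:
--                 counter[s[i]] -= 1
--     return None
-- ===== SOURCE B (Python) =====
-- def find_non_repeating(s, n):
--     if n < 0:
--         return None
--     for i in range(len(s) - n):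
--         if len(set(s[i:i+n])) == n:
--             return i + n
--     return None
-- ===== Notes on version B (the rewrite author's own statement) =====
-- stated objective: simpler
-- what changed: A slides a window while incrementally maintaining a Counter of the current window (add the entering char, decrement/delete the leaving one) and tests its size; B drops the Counter entirely and, for each start position in range(len(s)-n), rebuilds the window's distinct-character set from scratch and tests its size.
import Mathlib
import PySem

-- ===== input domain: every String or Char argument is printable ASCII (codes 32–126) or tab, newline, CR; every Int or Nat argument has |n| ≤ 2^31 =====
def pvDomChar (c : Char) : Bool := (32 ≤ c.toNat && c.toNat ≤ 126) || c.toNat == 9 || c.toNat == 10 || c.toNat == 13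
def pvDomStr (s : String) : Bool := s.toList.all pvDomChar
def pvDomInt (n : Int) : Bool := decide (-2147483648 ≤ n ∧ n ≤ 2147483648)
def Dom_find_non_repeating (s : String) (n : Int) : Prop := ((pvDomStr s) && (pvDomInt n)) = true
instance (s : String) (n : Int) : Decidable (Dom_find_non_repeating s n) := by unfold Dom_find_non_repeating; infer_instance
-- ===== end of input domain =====

-- B replaces A's incrementally-maintained Counter sliding window by a plain loop over start
-- positions that rebuilds each window's distinct set from scratch (simpler, not faster).

-- ===== PORT A =====
-- the for-loop of A with early return: counter is the Counter, (i, l) the enumerate pair;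
-- the `none` on an out-of-range s[i] is Python's IndexError — unreachable (i < len(s) always)
def pvLoopA (cs : List Char) (n : Int) : List (Int × Char) → PySem.Dict Char Int → Option Int
  | [], _ => none
  | (i, l) :: rest, counter =>
    if (counter.size : Int) = n then some (i + n)
    else
      -- if l not in counter: counter[l] = 0
      let c1 : PySem.Dict Char Int := if counter.contains l then counter else counter.insert l 0
      -- counter[l] += 1
      let c2 := c1.insert l (c1.getD l 0 + 1)
      match PySem.List.pyGet? cs i with
      | none => none
      | some old =>
        if c2.getD old 0 = 1 then pvLoopA cs n rest (c2.erase old)      -- del counter[s[i]]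
        else pvLoopA cs n rest (c2.insert old (c2.getD old 0 - 1))      -- counter[s[i]] -= 1

def find_non_repeating (s : String) (n : Int) : Option Int :=
  pvLoopA s.toList n (PySem.List.enumerate (PySem.List.slice s.toList (some n) none) 0)
    (PySem.Dict.counter (PySem.List.slice s.toList none (some n)))

-- ===== PORT B =====
-- if n < 0: return None; for i in range(len(s) - n): if len(set(s[i:i+n])) == n: return i + n
def pvLoopB (cs : List Char) (n : Int) : List Int → Option Int
  | [] => none
  | i :: rest =>
    if ((PySem.Set.ofList (PySem.List.slice cs (some i) (some (i + n)))).length : Int) = n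
    then some (i + n)
    else pvLoopB cs n rest

def find_non_repeating_alt (s : String) (n : Int) : Option Int :=
  if n < 0 then none
  else pvLoopB s.toList n (PySem.List.pyRange 0 ((s.toList.length : Int) - n) 1)

-- ===== PRECONDITION & SPEC =====
def Spec_find_non_repeating (s : String) (n : Int) (out : Option Int) : Prop := out = find_non_repeating_alt s n
instance (s : String) (n : Int) (out : Option Int) : Decidable (Spec_find_non_repeating s n out) := by unfold Spec_find_non_repeating; infer_instance

-- ===== CLAIM (what is proved, stated in full; the proofs are below) =====
def Claim_equal_find_non_repeating : Prop := ∀ (s : String) (n : Int), Dom_find_non_repeating s n → Spec_find_non_repeating s n (find_non_repeating s n)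

-- ===== LEMMAS AND PROOFS =====

-- PySem.Dict.erase carries no library lemmas; the next four facts about it are ours
theorem pv_find?_filter_ne {κ ν : Type} [BEq κ] [LawfulBEq κ] [DecidableEq κ]
    (l : List (κ × ν)) (k x : κ) :
    (l.filter (fun p => !(p.1 == k))).find? (fun p => p.1 == x)
      = if x = k then none else l.find? (fun p => p.1 == x) := by
  induction l with
  | nil => simp [ite_self]
  | cons p t ih =>
    by_cases hpk : p.1 = k
    · by_cases hxk : x = k
      · simp [List.filter_cons, hpk, hxk, ih]
      · have hpx : (p.1 == x) = false := by
          simp only [beq_eq_false_iff_ne, ne_eq]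
          intro h; exact hxk (by rw [← h, hpk])
        have hkx : (k == x) = false := by
          simp only [beq_eq_false_iff_ne, ne_eq]
          intro h; exact hxk h.symm
        simp [List.filter_cons, List.find?_cons, hpk, hxk, hpx, hkx, ih]
    · by_cases hxk : x = k
      · have hpx : (p.1 == x) = false := by
          simp only [beq_eq_false_iff_ne, ne_eq]
          intro h; exact hpk (by rw [h, hxk])
        simp [List.filter_cons, List.find?_cons, hpk, hxk, hpx, ih]
      · cases hpx : (p.1 == x) <;>
          simp [List.filter_cons, List.find?_cons, hpk, hxk, hpx, ih]

theorem pv_any_filter_ne {κ ν : Type} [BEq κ] [LawfulBEq κ] [DecidableEq κ]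
    (l : List (κ × ν)) (k x : κ) :
    (l.filter (fun p => !(p.1 == k))).any (fun p => p.1 == x)
      = if x = k then false else l.any (fun p => p.1 == x) := by
  induction l with
  | nil => simp [ite_self]
  | cons p t ih =>
    by_cases hpk : p.1 = k
    · by_cases hxk : x = k
      · simp [List.filter_cons, hpk, hxk, ih]
      · have hpx : (p.1 == x) = false := by
          simp only [beq_eq_false_iff_ne, ne_eq]
          intro h; exact hxk (by rw [← h, hpk])
        have hkx : (k == x) = false := by
          simp only [beq_eq_false_iff_ne, ne_eq]
          intro h; exact hxk h.symm
        simp [List.filter_cons, hpk, hxk, hpx, hkx, ih]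
    · by_cases hxk : x = k
      · have hpx : (p.1 == x) = false := by
          simp only [beq_eq_false_iff_ne, ne_eq]
          intro h; exact hpk (by rw [h, hxk])
        simp [List.filter_cons, hpk, hxk, hpx, ih]
      · cases hpx : (p.1 == x) <;>
          simp [List.filter_cons, hpk, hxk, hpx, ih]

theorem pv_get?_erase {κ ν : Type} [BEq κ] [LawfulBEq κ] [DecidableEq κ]
    (d : PySem.Dict κ ν) (k x : κ) :
    (d.erase k).get? x = if x = k then none else d.get? x := by
  obtain ⟨l⟩ := d
  simp only [PySem.Dict.erase, PySem.Dict.get?]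
  rw [pv_find?_filter_ne]
  split <;> simp

theorem pv_getD_erase {κ ν : Type} [BEq κ] [LawfulBEq κ] [DecidableEq κ]
    (d : PySem.Dict κ ν) (k x : κ) (d0 : ν) :
    (d.erase k).getD x d0 = if x = k then d0 else d.getD x d0 := by
  simp only [PySem.Dict.getD, pv_get?_erase]; split <;> rfl

theorem pv_contains_erase {κ ν : Type} [BEq κ] [LawfulBEq κ] [DecidableEq κ]
    (d : PySem.Dict κ ν) (k x : κ) :
    (d.erase k).contains x = if x = k then false else d.contains x := by
  obtain ⟨l⟩ := d
  simp only [PySem.Dict.erase, PySem.Dict.contains]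
  exact pv_any_filter_ne l k x

theorem pv_nodup_keys_erase {κ ν : Type} [BEq κ] (d : PySem.Dict κ ν) (k : κ)
    (h : d.keys.Nodup) : (d.erase k).keys.Nodup := by
  have hsub : (d.erase k).keys.Sublist d.keys :=
    List.Sublist.map _ List.filter_sublist
  exact h.sublist hsub

theorem pv_size_eq_keys_length {κ ν : Type} (d : PySem.Dict κ ν) : d.size = d.keys.length := by
  simp [PySem.Dict.size, PySem.Dict.keys]

-- two nodup lists with the same members have the same length
theorem pv_length_eq_of_nodup_of_mem_iff {α : Type} [DecidableEq α] {l₁ l₂ : List α}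
    (h₁ : l₁.Nodup) (h₂ : l₂.Nodup) (h : ∀ x, x ∈ l₁ ↔ x ∈ l₂) : l₁.length = l₂.length := by
  rw [← List.toFinset_card_of_nodup h₁, ← List.toFinset_card_of_nodup h₂]
  congr 1; ext x; simp [h]

-- A's loop returns None whenever n < 0 (the size test can never fire)
theorem pvLoopA_neg (cs : List Char) (n : Int) (hn : n < 0) :
    ∀ (lst : List (Int × Char)) (d : PySem.Dict Char Int), pvLoopA cs n lst d = none := by
  intro lst
  induction lst with
  | nil => intro d; rfl
  | cons p rest ih =>
    intro d
    obtain ⟨i, l⟩ := p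
    have hne : ¬ ((d.size : Int) = n) := by omega
    simp only [pvLoopA, if_neg hne]
    cases PySem.List.pyGet? cs i with
    | none => rfl
    | some old =>
      dsimp only
      split <;> split <;> exact ih _

-- main invariant: with the counter holding exactly the counts of window cs[j:j+N],
-- A's remaining loop equals B's remaining loop
theorem pv_loop_eq (cs : List Char) (N : Nat) :
    ∀ (k j : Nat) (d : PySem.Dict Char Int),
      cs.length - (N + j) = k →
      d.keys.Nodup →
      (∀ ch, d.getD ch 0 = (((cs.drop j).take N).count ch : Int)) →
      (∀ ch, d.contains ch = true ↔ ch ∈ (cs.drop j).take N) →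
      pvLoopA cs (N : Int) (PySem.List.enumerate (cs.drop (N + j)) (j : Int)) d
        = pvLoopB cs (N : Int) (PySem.List.pyRange (j : Int) ((cs.length : Int) - (N : Int)) 1) := by
  intro k
  induction k with
  | zero =>
    intro j d hk _ _ _
    have hle : cs.length ≤ N + j := by omega
    rw [List.drop_eq_nil_of_le hle, PySem.List.enumerate_nil,
        PySem.List.pyRange_one_eq_nil (by push_cast; omega)]
    rfl
  | succ k ih =>
    intro j d hk hnd hget hmem
    have hjlt : N + j < cs.length := by omega
    set w : List Char := (cs.drop j).take N with hw
    have hsize : d.size = (PySem.Set.ofList w).length := by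
      rw [pv_size_eq_keys_length]
      exact pv_length_eq_of_nodup_of_mem_iff hnd (PySem.Set.nodup_ofList w)
        (fun x => by rw [← PySem.Dict.contains_iff_mem_keys, PySem.Set.mem_ofList]; exact hmem x)
    rw [List.drop_eq_getElem_cons hjlt, PySem.List.enumerate_cons,
        PySem.List.pyRange_one_cons (a := (j : Int)) (by push_cast; omega)]
    have hslice : PySem.List.slice cs (some (j : Int)) (some ((j : Int) + (N : Int))) = w :=
      PySem.List.slice_natCast_add cs j N
    by_cases hcond : (((PySem.Set.ofList w).length : Nat) : Int) = (N : Int)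
    · simp only [pvLoopA, pvLoopB, hslice, hsize, if_pos hcond]
    · simp only [pvLoopA, pvLoopB, hslice, hsize, if_neg hcond]
      -- the window is full (len N) and not all-distinct, so N ≥ 1
      have hN1 : 1 ≤ N := by
        by_contra h
        have hN0 : N = 0 := by omega
        apply hcond
        rw [hw, hN0]
        simp
      have hjlen : j < cs.length := by omega
      set c : Char := cs[N + j] with hc
      set mid : List Char := (cs.drop (j + 1)).take (N - 1) with hmid
      have hwcons : w = cs[j] :: mid := by
        rw [hw, hmid, List.drop_eq_getElem_cons hjlen]
        obtain ⟨m, hm⟩ : ∃ m, N = m + 1 := ⟨N - 1, by omega⟩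
        subst hm
        simp only [List.take_succ_cons, Nat.add_sub_cancel]
      have hw' : (cs.drop (j + 1)).take N = mid ++ [c] := by
        obtain ⟨m, hm⟩ : ∃ m, N = m + 1 := ⟨N - 1, by omega⟩
        subst hm
        have h1 : m < (cs.drop (j + 1)).length := by
          simp only [List.length_drop]; omega
        have h2 : (cs.drop (j + 1))[m]'h1 = cs[m + 1 + j]'hjlt := by
          simp only [List.getElem_drop]
          simp [show j + 1 + m = m + 1 + j from by omega]
        rw [hmid, hc, List.take_succ, List.getElem?_eq_getElem h1, Option.toList_some, h2]
        simp
      have hcount_w : ∀ ch, w.count ch = mid.count ch + (if ch = cs[j] then 1 else 0) := by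
        intro ch
        rw [hwcons, List.count_cons]
        by_cases hcc : ch = cs[j]
        · subst hcc; simp
        · have hne : (cs[j] == ch) = false := by
            simp only [beq_eq_false_iff_ne, ne_eq]
            intro h; exact hcc h.symm
          simp [hne, hcc]
      have hcount_w' : ∀ ch, ((cs.drop (j + 1)).take N).count ch
          = mid.count ch + (if ch = c then 1 else 0) := by
        intro ch
        rw [hw', List.count_append, List.count_cons]
        by_cases hcc : ch = c
        · subst hcc; simp
        · have hne : (c == ch) = false := by
            simp only [beq_eq_false_iff_ne, ne_eq]
            intro h; exact hcc h.symm
          simp [hne, hcc]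
      set c1 : PySem.Dict Char Int := if d.contains c then d else d.insert c 0 with hc1
      set c2 : PySem.Dict Char Int := c1.insert c (c1.getD c 0 + 1) with hc2
      have hc1getD : ∀ ch, c1.getD ch 0 = d.getD ch 0 := by
        intro ch
        rw [hc1]
        split
        · rfl
        · rename_i hnc
          rw [PySem.Dict.getD_insert]
          split
          · rename_i he
            subst he
            have hnm : c ∉ w := fun hmm => hnc ((hmem c).mpr hmm)
            rw [hget, List.count_eq_zero_of_not_mem hnm]
            simp
          · rfl
      have hc2getD : ∀ ch, c2.getD ch 0 = d.getD ch 0 + (if ch = c then 1 else 0) := by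
        intro ch
        rw [hc2, PySem.Dict.getD_insert]
        split
        · rename_i he; subst he; rw [hc1getD]
        · rw [hc1getD]; simp
      have hc2mem : ∀ ch, c2.contains ch = true ↔ (ch = c ∨ ch ∈ w) := by
        intro ch
        have hb : c2.contains ch = (ch == c || d.contains ch) := by
          rw [hc2, PySem.Dict.contains_insert, hc1]
          split
          · rfl
          · rw [PySem.Dict.contains_insert]
            cases hcc : (ch == c) <;> simp
        rw [hb]
        simp [hmem ch]
      have hc2nd : c2.keys.Nodup := by
        rw [hc2, hc1]
        split
        · exact PySem.Dict.nodup_keys_insert _ _ _ hnd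
        · exact PySem.Dict.nodup_keys_insert _ _ _ (PySem.Dict.nodup_keys_insert _ _ _ hnd)
      have holdmem : cs[j] ∈ w := by rw [hwcons]; exact List.mem_cons_self
      have holdcount : 1 ≤ w.count cs[j] := List.count_pos_iff.mpr holdmem
      have hpg : PySem.List.pyGet? cs ((j : Nat) : Int) = some cs[j] := by
        rw [PySem.List.pyGet?_natCast, List.getElem?_eq_getElem hjlen]
      rw [hpg]
      dsimp only
      have hg : c2.getD cs[j] 0 = (w.count cs[j] : Int) + (if cs[j] = c then 1 else 0) := by
        rw [hc2getD, hget]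
      have hkeq : cs.length - (N + (j + 1)) = k := by omega
      have hcast : ((j : Int) + 1) = ((j + 1 : Nat) : Int) := by push_cast; ring
      have hdrop : N + j + 1 = N + (j + 1) := by omega
      by_cases h1 : c2.getD cs[j] 0 = 1
      · -- del counter[s[j]]  (count of cs[j] in the window was exactly 1, so cs[j] ≠ c)
        rw [if_pos h1]
        rw [hg] at h1
        have hnc : ¬ (cs[j] = c) := by
          intro he
          rw [if_pos he] at h1
          omega
        have hcnt1 : w.count cs[j] = 1 := by
          rw [if_neg hnc] at h1
          omega
        have hmid0 : mid.count cs[j] = 0 := by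
          have hcw := hcount_w cs[j]
          simp at hcw
          omega
        rw [hcast, hdrop]
        apply ih (j + 1) _ hkeq
        · exact pv_nodup_keys_erase _ _ hc2nd
        · intro ch
          rw [pv_getD_erase, hcount_w' ch]
          split
          · rename_i he
            subst he
            rw [if_neg hnc, hmid0]
            simp
          · rename_i hne
            rw [hc2getD, hget, hcount_w ch, if_neg hne]
            split_ifs <;> push_cast <;> ring
        · intro ch
          rw [pv_contains_erase]
          split
          · rename_i he
            subst he
            simp only [Bool.false_eq_true, false_iff]
            rw [hw']
            intro hmm
            rcases List.mem_append.mp hmm with h | h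
            · exact absurd (List.count_pos_iff.mpr h) (by omega)
            · exact hnc (List.mem_singleton.mp h)
          · rename_i hne
            rw [hc2mem ch, hw', hwcons]
            constructor
            · rintro (rfl | h)
              · exact List.mem_append.mpr (Or.inr (by simp))
              · rcases List.mem_cons.mp h with h' | h'
                · exact absurd h' hne
                · exact List.mem_append.mpr (Or.inl h')
            · intro h
              rcases List.mem_append.mp h with h' | h'
              · exact Or.inr (List.mem_cons_of_mem _ h')
              · exact Or.inl (List.mem_singleton.mp h')
      · -- counter[s[j]] -= 1  (count of cs[j] in the window stays positive)
        rw [if_neg h1, hcast, hdrop]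
        apply ih (j + 1) _ hkeq
        · exact PySem.Dict.nodup_keys_insert _ _ _ hc2nd
        · intro ch
          rw [PySem.Dict.getD_insert, hcount_w' ch]
          split
          · rename_i he
            subst he
            have hgw := hg
            rw [hcount_w cs[j]] at hgw
            by_cases hec : cs[j] = c <;> simp [hec] at hgw ⊢ <;> omega
          · rename_i hne
            rw [hc2getD, hget, hcount_w ch, if_neg hne]
            split_ifs <;> push_cast <;> ring
        · intro ch
          rw [PySem.Dict.contains_insert]
          by_cases he : ch = cs[j]
          · subst he
            simp only [beq_self_eq_true, Bool.true_or, true_iff]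
            rw [hw']
            rw [hg] at h1
            by_cases hec : cs[j] = c
            · exact List.mem_append.mpr (Or.inr (by rw [hec]; simp))
            · have h2 : 2 ≤ w.count cs[j] := by
                rw [if_neg hec] at h1
                omega
              have h3 : 1 ≤ mid.count cs[j] := by
                have hcw := hcount_w cs[j]
                simp at hcw
                omega
              exact List.mem_append.mpr (Or.inl (List.count_pos_iff.mp (by omega)))
          · have hbeq : (ch == cs[j]) = false := by simp [he]
            rw [hbeq]
            simp only [Bool.false_or]
            rw [hc2mem ch, hw', hwcons]
            constructor
            · rintro (rfl | h)
              · exact List.mem_append.mpr (Or.inr (by simp))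
              · rcases List.mem_cons.mp h with h' | h'
                · exact absurd h' he
                · exact List.mem_append.mpr (Or.inl h')
            · intro h
              rcases List.mem_append.mp h with h' | h'
              · exact Or.inr (List.mem_cons_of_mem _ h')
              · exact Or.inl (List.mem_singleton.mp h')

-- ===== VERDICT (by name: the statement is the Claim_ definition above) =====
theorem find_non_repeating_spec : Claim_equal_find_non_repeating := by
  intro s n _
  unfold Spec_find_non_repeating find_non_repeating find_non_repeating_alt
  by_cases hn : 0 ≤ n
  · obtain ⟨N, rfl⟩ : ∃ N : Nat, (N : Int) = n := ⟨n.toNat, Int.toNat_of_nonneg hn⟩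
    rw [PySem.List.slice_from_natCast, PySem.List.slice_to_natCast,
        if_neg (by omega : ¬ ((N : Int) < 0))]
    have := pv_loop_eq s.toList N (s.toList.length - (N + 0)) 0
      (PySem.Dict.counter (s.toList.take N)) rfl
      (PySem.Dict.nodup_keys_counter _)
      (fun ch => by rw [PySem.Dict.getD_counter]; simp)
      (fun ch => by rw [PySem.Dict.contains_counter]; simp)
    simpa using this
  · push_neg at hn
    rw [pvLoopA_neg s.toList n hn, if_pos hn]
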